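-- pv_equiv track=rewrite | github.com/aleversn/MABR-CTR | Spotify.py | order_dict
-- ===== SOURCE A (Python) =====
-- def order_dict(dicts, n):
--     result = []
--     result1 = []
--     p = sorted([(k, v) for k, v in dicts.items()], reverse=True)
--     s = set()
--     for i in p:
--         s.add(i[1])
--     for i in sorted(s, reverse=True)[:n]:
--         for j in p:
--             if j[1] == i:
--                 result.append(j)
--     for r in result:
--         result1.append(r[0])
--     return result1
-- ===== SOURCE B (Python) =====
-- def order_dict(dicts, n):
--     groups = {}
--     for k, v in dicts.items():
--         groups.setdefault(v, []).append(k)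
--     out = []
--     for v in sorted(groups, reverse=True)[:n]:
--         out.extend(sorted(groups[v], reverse=True))
--     return out
-- ===== Notes on version B (the rewrite author's own statement) =====
-- stated objective: faster
-- what changed: B groups keys by value in one dict pass and emits the top-n value groups, each sorted descending, instead of A's full rescan of the sorted item list for every one of the top-n distinct values.
import Mathlib
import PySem

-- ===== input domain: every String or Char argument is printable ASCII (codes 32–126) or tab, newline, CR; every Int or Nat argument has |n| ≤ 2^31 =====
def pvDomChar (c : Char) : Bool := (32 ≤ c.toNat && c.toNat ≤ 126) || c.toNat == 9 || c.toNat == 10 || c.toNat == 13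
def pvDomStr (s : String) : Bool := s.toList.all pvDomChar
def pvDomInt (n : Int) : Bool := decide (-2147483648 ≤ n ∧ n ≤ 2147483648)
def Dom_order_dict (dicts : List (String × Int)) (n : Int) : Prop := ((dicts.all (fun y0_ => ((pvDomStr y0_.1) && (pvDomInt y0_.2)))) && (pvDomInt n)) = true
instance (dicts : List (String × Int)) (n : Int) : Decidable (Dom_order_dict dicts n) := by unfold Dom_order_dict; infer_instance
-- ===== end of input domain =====

-- B groups keys by value in one dict pass and emits the top-n value groups (each sorted descending),
-- instead of A's rescan of the whole sorted item list for every distinct value (objective: faster).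

-- ===== PORT A =====
def order_dict (dicts : List (String × Int)) (n : Int) : List String :=
  -- p = sorted([(k, v) for k, v in dicts.items()], reverse=True)   (tuple key)
  let p := PySem.List.sorted2 dicts (fun kv => kv.1) (fun kv => kv.2) true
  -- s = set(); for i in p: s.add(i[1])
  let s : PySem.Set Int := p.foldl (fun s i => PySem.Set.add s i.2) PySem.Set.empty
  -- for i in sorted(s, reverse=True)[:n]: for j in p: if j[1] == i: result.append(j)
  let result := (PySem.List.slice (PySem.List.sorted s (fun v => v) true) none (some n)).foldl
      (fun result i => p.foldl (fun result j => if j.2 == i then result ++ [j] else result) result) []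
  -- for r in result: result1.append(r[0])
  result.foldl (fun result1 r => result1 ++ [r.1]) []

-- ===== PORT B =====
def order_dict_alt (dicts : List (String × Int)) (n : Int) : List String :=
  -- groups = {}; for k, v in dicts.items(): groups.setdefault(v, []).append(k)
  let groups : PySem.Dict Int (List String) :=
    dicts.foldl (fun d kv => d.modify kv.2 [] (fun ks => ks ++ [kv.1])) PySem.Dict.empty
  -- for v in sorted(groups, reverse=True)[:n]: out.extend(sorted(groups[v], reverse=True))
  (PySem.List.slice (PySem.List.sorted groups.keys (fun v => v) true) none (some n)).foldl
      (fun out v => out ++ PySem.List.sorted (groups.getD v []) (fun k => k) true) []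

-- ===== PRECONDITION & SPEC =====
-- Pre_ excludes association lists with duplicate keys: A's argument is a Python dict, which cannot
-- hold a duplicate key (dict() collapses them, last value winning), so the assoc-list model is
-- ambiguous there; lists with distinct keys are exactly the genuine dict inputs.
def Pre_order_dict (dicts : List (String × Int)) (_n : Int) : Prop :=
  (dicts.map (fun kv => kv.1)).Nodup
instance (dicts : List (String × Int)) (n : Int) : Decidable (Pre_order_dict dicts n) := by
  unfold Pre_order_dict; infer_instance

def pvWitness_order_dict : (List (String × Int)) × Int := ([("a", 2), ("b", 2), ("c", 1)], 1)

def Spec_order_dict (dicts : List (String × Int)) (n : Int) (out : List String) : Prop := out = order_dict_alt dicts n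
instance (dicts : List (String × Int)) (n : Int) (out : List String) : Decidable (Spec_order_dict dicts n out) := by unfold Spec_order_dict; infer_instance

-- ===== CLAIM (what is proved, stated in full; the proofs are below) =====
def Claim_equal_order_dict : Prop := ∀ (dicts : List (String × Int)) (n : Int), Dom_order_dict dicts n → Pre_order_dict dicts n → Spec_order_dict dicts n (order_dict dicts n)

-- ===== LEMMAS AND PROOFS =====

-- insertBy only compares the inserted element against list members, in that direction
theorem insertBy_congr_mem {α : Type} (f g : α → α → Bool) (x : α) (ys : List α)
    (h : ∀ y ∈ ys, f x y = g x y) :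
    PySem.List.insertBy f x ys = PySem.List.insertBy g x ys := by
  induction ys with
  | nil => rfl
  | cons y ys ih =>
    simp only [PySem.List.insertBy]
    rw [h y (by simp)]
    by_cases hg : g x y = true
    · simp [hg]
    · simp only [Bool.not_eq_true] at hg
      simp [hg, ih (fun y hy => h y (by simp [hy]))]

-- an insertion-sort fold is unchanged if the two comparators agree on all pairs drawn from S
theorem foldl_insertBy_congr {α : Type} (f g : α → α → Bool) (S : List α)
    (hfg : ∀ a ∈ S, ∀ b ∈ S, f a b = g a b) :
    ∀ (l acc : List α), (∀ x ∈ l, x ∈ S) → (∀ y ∈ acc, y ∈ S) →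
      l.foldl (fun acc x => PySem.List.insertBy f x acc) acc =
      l.foldl (fun acc x => PySem.List.insertBy g x acc) acc := by
  intro l
  induction l with
  | nil => intro acc _ _; rfl
  | cons x l ih =>
    intro acc hl hacc
    have hx : x ∈ S := hl x (by simp)
    simp only [List.foldl_cons]
    rw [insertBy_congr_mem f g x acc (fun y hy => hfg x hx y (hacc y hy))]
    exact ih _ (fun z hz => hl z (by simp [hz]))
      (fun y hy => ((PySem.List.insertBy_mem_iff g x y acc).1 hy).elim
        (fun he => he ▸ hx) (fun hm => hacc y hm))

-- with pairwise-distinct keys, sorting by the (key, value) tuple is sorting by the key alone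
theorem sorted2_eq_sorted_fst (dicts : List (String × Int))
    (hnd : (dicts.map (fun kv => kv.1)).Nodup) :
    PySem.List.sorted2 dicts (fun kv => kv.1) (fun kv => kv.2) true
      = PySem.List.sorted dicts (fun kv => kv.1) true := by
  have hinj : ∀ a ∈ dicts, ∀ b ∈ dicts, a.1 = b.1 → a = b := by
    intro a ha b hb hab
    exact List.inj_on_of_nodup_map hnd ha hb hab
  simp only [PySem.List.sorted2, PySem.List.sorted]
  refine foldl_insertBy_congr _ _ dicts ?_ dicts [] (fun x hx => hx) (by simp)
  intro a ha b hb
  by_cases h1 : a.1 = b.1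
  · have : a = b := hinj a ha b hb h1
    subst this
    simp
  · rcases lt_or_gt_of_ne h1 with h | h
    · simp [not_lt_of_gt h, h]
    · simp [h, not_lt_of_gt h]

-- set(xs) of a rearrangement is a rearrangement of set(xs)
theorem ofList_perm_of_perm {xs ys : List Int} (h : xs.Perm ys) :
    (PySem.Set.ofList xs).Perm (PySem.Set.ofList ys) := by
  refine (List.perm_ext_iff_of_nodup (PySem.Set.nodup_ofList xs) (PySem.Set.nodup_ofList ys)).2 ?_
  intro a
  simp [PySem.Set.mem_ofList, h.mem_iff]

-- sorted(_, reverse=True) of a duplicate-free list depends only on its elements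
theorem sorted_rev_id_congr_perm {xs ys : List Int} (h : xs.Perm ys) (hnd : ys.Nodup) :
    PySem.List.sorted xs (fun v => v) true = PySem.List.sorted ys (fun v => v) true := by
  apply PySem.List.sorted_rev_eq_of_perm_of_pairwise_gt
  · exact (PySem.List.sorted_perm ys (fun v => v) true).trans h.symm
  · have hle := PySem.List.sorted_pairwise_rev ys (fun v => v)
    have hne : (PySem.List.sorted ys (fun v => v) true).Nodup :=
      ((PySem.List.sorted_perm ys (fun v => v) true).nodup_iff).2 hnd
    exact (hle.and hne).imp (fun hab => lt_of_le_of_ne hab.1 hab.2.symm)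

-- the keys of value v, taken from the (k,v)-descending item list, are that value's group sorted descending
theorem group_sorted_eq (dicts : List (String × Int))
    (hnd : (dicts.map (fun kv => kv.1)).Nodup) (v : Int) :
    PySem.List.sorted ((dicts.filter (fun kv => kv.2 == v)).map (fun kv => kv.1)) (fun k => k) true
      = ((PySem.List.sorted dicts (fun kv => kv.1) true).filter (fun j => j.2 == v)).map (fun kv => kv.1) := by
  apply PySem.List.sorted_rev_eq_of_perm_of_pairwise_gt
  · exact (((PySem.List.sorted_perm dicts (fun kv => kv.1) true).filter _).map _)
  · have hle : (PySem.List.sorted dicts (fun kv => kv.1) true).Pairwise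
        (fun a b : String × Int => b.1 ≤ a.1) :=
      PySem.List.sorted_pairwise_rev dicts (fun kv => kv.1)
    have hndq : ((PySem.List.sorted dicts (fun kv => kv.1) true).map (fun kv => kv.1)).Nodup :=
      (((PySem.List.sorted_perm dicts (fun kv => kv.1) true).map (fun kv => kv.1)).nodup_iff).2 hnd
    have hne : (PySem.List.sorted dicts (fun kv => kv.1) true).Pairwise
        (fun a b : String × Int => a.1 ≠ b.1) := by
      rw [List.nodup_iff_pairwise_ne, List.pairwise_map] at hndq
      exact hndq
    have hlt : (PySem.List.sorted dicts (fun kv => kv.1) true).Pairwise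
        (fun a b : String × Int => b.1 < a.1) :=
      (hle.and hne).imp (fun hab => lt_of_le_of_ne hab.1 hab.2.symm)
    rw [List.pairwise_map]
    exact hlt.filter _

-- ===== VERDICT (by name: the statement is the Claim_ definition above) =====
theorem order_dict_spec : Claim_equal_order_dict := by
  intro dicts n _ hpre
  unfold Spec_order_dict order_dict order_dict_alt
  have hnd : (dicts.map (fun kv => kv.1)).Nodup := hpre
  rw [sorted2_eq_sorted_fst dicts hnd]
  set q := PySem.List.sorted dicts (fun kv => kv.1) true with hq
  -- A side: the value set, the nested collection loops
  have hsA : q.foldl (fun s i => PySem.Set.add s i.2) PySem.Set.empty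
      = PySem.Set.ofList (q.map (fun kv => kv.2)) := by
    rw [PySem.Set.ofList_eq_foldl, List.foldl_map]
    rfl
  -- B side: the dict's keys and per-value groups
  have hfold : dicts.foldl (fun d kv => d.modify kv.2 [] (fun ks => ks ++ [kv.1]))
        (PySem.Dict.empty : PySem.Dict Int (List String))
      = (dicts.map (fun kv => (kv.2, kv.1))).foldl
          (fun d p => d.modify p.1 [] (fun ks => ks ++ [p.2])) PySem.Dict.empty := by
    rw [List.foldl_map]
  have hkeys : ((dicts.map (fun kv => (kv.2, kv.1))).foldl
        (fun d p => d.modify p.1 [] (fun ks => ks ++ [p.2]))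
        (PySem.Dict.empty : PySem.Dict Int (List String))).keys
      = PySem.Set.ofList (dicts.map (fun kv => kv.2)) := by
    have := PySem.Dict.keys_foldl_modify_key (dicts.map (fun kv => (kv.2, kv.1)))
      (fun p => p.1) [] (fun d p => fun ks => ks ++ [p.2])
      (PySem.Dict.empty : PySem.Dict Int (List String))
    simp only [List.map_map] at this
    rw [this, PySem.Set.ofList_eq_foldl]
    rfl
  have hgetD : ∀ v : Int, ((dicts.map (fun kv => (kv.2, kv.1))).foldl
        (fun d p => d.modify p.1 [] (fun ks => ks ++ [p.2]))
        (PySem.Dict.empty : PySem.Dict Int (List String))).getD v []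
      = (dicts.filter (fun kv => kv.2 == v)).map (fun kv => kv.1) := by
    intro v
    rw [PySem.Dict.getD_foldl_modify_append]
    simp [List.filter_map, List.map_map, Function.comp_def]
  -- equal top-n value lists
  have hperm : (q.map (fun kv => kv.2)).Perm (dicts.map (fun kv => kv.2)) :=
    (PySem.List.sorted_perm dicts (fun kv => kv.1) true).map _
  have htop : PySem.List.sorted (PySem.Set.ofList (q.map (fun kv => kv.2))) (fun v => v) true
      = PySem.List.sorted (PySem.Set.ofList (dicts.map (fun kv => kv.2))) (fun v => v) true :=
    sorted_rev_id_congr_perm (ofList_perm_of_perm hperm)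
      (PySem.Set.nodup_ofList (dicts.map (fun kv => kv.2)))
  simp only [hsA, hfold, hkeys, hgetD, htop,
    PySem.List.foldl_append_if_eq_filter, PySem.List.foldl_append_eq_flatMap,
    List.nil_append]
  rw [List.flatMap_assoc]
  refine List.flatMap_congr (fun v _ => ?_)
  rw [← List.map_eq_flatMap]
  exact (group_sorted_eq dicts hnd v).symm
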